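-- pv_equiv track=rewrite | github.com/RubenD582/Chess-Evaluation | main.py | get_coordinate_from_index
-- ===== SOURCE A (Python) =====
-- board_grid = [8, 8]
--
-- def get_coordinate_from_index(fen, index):
--     _x = 0
--     _y = 0
--     for i in range(len(fen)):
--         if fen[i] == "/":
--             _x = 0
--             _y += 1
--         elif fen[i].lower() in ["r", "n", "b", "q", "k", "p"]:
--             _x += 1
--         elif str(fen[i]) in ["1", "2", "3", "4", "5", "6", "7", "8", "9"]:
--             _x += int(fen[i])
--
--         if i == index:
--             return _x - 1, board_grid[1] - _y
--
--     return None
-- ===== SOURCE B (Python) =====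
-- board_grid = [8, 8]
--
-- def get_coordinate_from_index(fen, index):
--     if not (0 <= index < len(fen)):
--         return None
--     prefix = fen[:index + 1]
--     y = prefix.count('/')
--     start = prefix.rfind('/') + 1
--     x = 0
--     for ch in prefix[start:]:
--         if ch.lower() in 'rnbqkp':
--             x += 1
--         elif '1' <= ch <= '9':
--             x += int(ch)
--     return x - 1, board_grid[1] - y
-- ===== Notes on version B (the rewrite author's own statement) =====
-- stated objective: faster
-- what changed: Replaces the stateful per-character left-to-right scan with early return by an index guard plus a prefix decomposition: rank = count of '/' in fen[:index+1] (str.count), file accumulated only over the segment after the last '/' located via rfind.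
import Mathlib
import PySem

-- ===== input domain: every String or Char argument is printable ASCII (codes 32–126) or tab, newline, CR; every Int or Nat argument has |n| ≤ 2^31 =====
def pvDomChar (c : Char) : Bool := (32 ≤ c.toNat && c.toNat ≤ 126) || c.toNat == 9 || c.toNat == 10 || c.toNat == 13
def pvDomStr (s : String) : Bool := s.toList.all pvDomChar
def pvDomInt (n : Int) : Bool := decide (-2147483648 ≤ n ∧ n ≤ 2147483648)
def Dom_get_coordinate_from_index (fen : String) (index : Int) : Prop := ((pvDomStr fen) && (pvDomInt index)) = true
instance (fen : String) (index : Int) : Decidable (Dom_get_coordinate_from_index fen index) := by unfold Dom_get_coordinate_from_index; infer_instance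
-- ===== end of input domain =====

-- B replaces A's stateful scan-with-early-return by a guard + prefix decomposition
-- (count '/' for the rank, rfind-located last segment summed for the file); objective: idiomatic.

-- ===== PORT A =====
-- one body of A's loop: the three branches in source order ('/' resets x; piece; digit)
def pvStep (s : Int × Int) (c : Char) : Int × Int :=
  if c = '/' then (0, s.2 + 1)
  else if c.toLower ∈ ['r', 'n', 'b', 'q', 'k', 'p'] then (s.1 + 1, s.2)
  -- int(fen[i]) on a char guarded to be '1'..'9' is exactly its code minus 48
  else if c ∈ ['1', '2', '3', '4', '5', '6', '7', '8', '9'] then (s.1 + ((c.toNat : Int) - 48), s.2)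
  else s

-- A's 'for i in range(len(fen))' with early return at i == index
def pvALoop : List Char → Int → Int → Int → Int → Option (Int × Int)
  | [], _, _, _, _ => none
  | c :: rest, index, i, x, y =>
    let s := pvStep (x, y) c
    -- board_grid[1] = 8
    if i = index then some (s.1 - 1, 8 - s.2) else pvALoop rest index (i + 1) s.1 s.2

def get_coordinate_from_index (fen : String) (index : Int) : Option (Int × Int) :=
  pvALoop fen.toList index 0 0 0

-- ===== PORT B =====
-- one body of B's segment loop: piece adds 1, digit ch ('1'..'9') adds int(ch) = code - 48
def pvContrib (x : Int) (c : Char) : Int :=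
  if c.toLower ∈ ['r', 'n', 'b', 'q', 'k', 'p'] then x + 1
  else if c ∈ ['1', '2', '3', '4', '5', '6', '7', '8', '9'] then x + ((c.toNat : Int) - 48)
  else x

def get_coordinate_from_index_alt (fen : String) (index : Int) : Option (Int × Int) :=
  let cs := fen.toList
  if 0 ≤ index ∧ index < cs.length then
    -- fen[:index+1]; the guard gives 0 ≤ index, so the slice is a take
    let pre := cs.take ((index + 1).toNat)
    let y : Int := pre.count '/'
    -- prefix.rfind('/') + 1: last occurrence found by searching the reverse
    let start := match pre.reverse.idxOf? '/' with
      | some k => pre.length - k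
      | none => 0
    let x := (pre.drop start).foldl pvContrib 0
    -- board_grid[1] = 8
    some (x - 1, 8 - y)
  else none

-- ===== PRECONDITION & SPEC =====
def Spec_get_coordinate_from_index (fen : String) (index : Int) (out : Option (Int × Int)) : Prop := out = get_coordinate_from_index_alt fen index
instance (fen : String) (index : Int) (out : Option (Int × Int)) : Decidable (Spec_get_coordinate_from_index fen index out) := by unfold Spec_get_coordinate_from_index; infer_instance

-- ===== CLAIM (what is proved, stated in full; the proofs are below) =====
def Claim_equal_get_coordinate_from_index : Prop := ∀ (fen : String) (index : Int), Dom_get_coordinate_from_index fen index → Spec_get_coordinate_from_index fen index (get_coordinate_from_index fen index)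

-- ===== LEMMAS AND PROOFS =====

-- A's loop, characterised: it returns exactly when index lands in range, with the
-- state folded over the prefix of length index - i + 1.
theorem pvALoop_eq (cs : List Char) : ∀ (index i x y : Int),
    pvALoop cs index i x y =
      if 0 ≤ index - i ∧ index - i < cs.length then
        let s := (cs.take ((index - i).toNat + 1)).foldl pvStep (x, y)
        some (s.1 - 1, 8 - s.2)
      else none := by
  induction cs with
  | nil => intro index i x y; simp [pvALoop]
  | cons c rest ih =>
    intro index i x y
    by_cases h : i = index
    · subst h
      have hc : 0 ≤ i - i ∧ i - i < (c :: rest).length := by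
        refine ⟨by omega, by simp⟩
      simp [pvALoop, hc]
    · rw [pvALoop]
      simp only [if_neg h]
      rw [ih index (i + 1) (pvStep (x, y) c).1 (pvStep (x, y) c).2]
      by_cases hr : 0 ≤ index - (i + 1) ∧ index - (i + 1) < (rest.length : Int)
      · have hc : 0 ≤ index - i ∧ index - i < ((c :: rest).length : Int) := by
          simp only [List.length_cons]; push_cast; omega
        have htn : (index - i).toNat + 1 = ((index - (i + 1)).toNat + 1) + 1 := by omega
        simp only [if_pos hr, if_pos hc, htn, List.take_succ_cons, List.foldl_cons]
      · have hc : ¬ (0 ≤ index - i ∧ index - i < ((c :: rest).length : Int)) := by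
          simp only [List.length_cons] at *; push_cast at *; omega
        simp only [if_neg hr, if_neg hc]

-- start-of-last-segment used by B
def pvStart (p : List Char) : Nat :=
  match p.reverse.idxOf? '/' with
  | some k => p.length - k
  | none => 0

-- Folding A's step over a prefix gives exactly B's decomposition:
-- x is the contribution-sum of the segment after the last '/', y is the '/'-count.
theorem foldl_pvStep_eq (p : List Char) :
    p.foldl pvStep (0, 0) = ((p.drop (pvStart p)).foldl pvContrib 0, (p.count '/' : Int)) := by
  induction p using List.reverseRecOn with
  | nil => simp [pvStart]
  | append_singleton p c ih =>
    rw [List.foldl_append, List.foldl_cons, List.foldl_nil, ih]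
    by_cases hc : c = '/'
    · subst hc
      have hstart : pvStart (p ++ ['/']) = p.length + 1 := by
        simp [pvStart, List.idxOf?, List.findIdx?_cons]
      simp [pvStep, hstart, List.count_append]
    · have hstep : pvStep ((p.drop (pvStart p)).foldl pvContrib 0, (p.count '/' : Int)) c
          = (pvContrib ((p.drop (pvStart p)).foldl pvContrib 0) c, (p.count '/' : Int)) := by
        simp only [pvStep, pvContrib]
        split_ifs <;> simp_all
      rw [hstep]
      have hrev : (p ++ [c]).reverse = c :: p.reverse := by simp
      have hidx : (p ++ [c]).reverse.idxOf? '/' = (p.reverse.idxOf? '/').map (· + 1) := by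
        rw [hrev]
        cases hfind : p.reverse.idxOf? '/' <;>
          simp_all [List.idxOf?, List.findIdx?_cons]
      have hseg : (p ++ [c]).drop (pvStart (p ++ [c])) = p.drop (pvStart p) ++ [c] := by
        unfold pvStart
        rw [hidx]
        cases hfind : p.reverse.idxOf? '/' with
        | none => simp
        | some k =>
          have hk : k < p.length := by
            obtain ⟨hk, -, -⟩ := List.idxOf?_eq_some_iff.mp hfind
            simpa using hk
          simp only [Option.map_some, List.length_append, List.length_cons, List.length_nil]
          have harith : p.length + 1 - (k + 1) = p.length - k := by omega
          rw [List.drop_append_of_le_length (by omega), harith]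
      rw [hseg, List.foldl_append, List.foldl_cons, List.foldl_nil]
      have : (p ++ [c]).count '/' = p.count '/' := by
        simp [List.count_append, hc]
      rw [this]

-- ===== VERDICT (by name: the statement is the Claim_ definition above) =====
theorem get_coordinate_from_index_spec : Claim_equal_get_coordinate_from_index := by
  intro fen index _
  unfold Spec_get_coordinate_from_index get_coordinate_from_index get_coordinate_from_index_alt
  rw [pvALoop_eq]
  by_cases h : 0 ≤ index ∧ index < (fen.toList.length : Int)
  · have h0 : 0 ≤ index - 0 ∧ index - 0 < (fen.toList.length : Int) := by omega
    have htn : (index + 1).toNat = (index - 0).toNat + 1 := by omega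
    simp only [if_pos h, if_pos h0, htn]
    rw [foldl_pvStep_eq]
    simp [pvStart]
  · have h0 : ¬ (0 ≤ index - 0 ∧ index - 0 < (fen.toList.length : Int)) := by omega
    simp only [if_neg h, if_neg h0]
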